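-- pv_equiv track=rewrite | github.com/dampierch/aneuploidy | scripts/count_hetalleles.py | allele_counts
-- ===== SOURCE A (Python) =====
-- bases = ('A','C','G','T')
--
-- def allele_counts(alleles, known_alleles):
--     '''
--     Count alleles where alleles is a list of A,C,G,T
--     '''
--     counts = {x:0 for x in bases}  ## reset counter
--     known_total = total = 0
--     for allele in alleles:
--         if allele in counts:
--             counts[allele] = counts[allele] + 1
--             total = total + 1
--         if allele in known_alleles:
--             known_total = known_total + 1
--     return (counts, known_total, total)
-- ===== SOURCE B (Python) =====
-- bases = ('A','C','G','T')
--
-- def allele_counts(alleles, known_alleles):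
--     '''
--     Count alleles where alleles is a list of A,C,G,T
--     '''
--     counts = {x: alleles.count(x) for x in bases}
--     known_total = sum(1 for a in alleles if a in known_alleles)
--     return (counts, known_total, sum(counts.values()))
-- ===== Notes on version B (the rewrite author's own statement) =====
-- stated objective: idiomatic
-- what changed: Replaces the single explicit loop that mutates a dict and two running totals with declarative one-liners: a per-base count comprehension, a generator-expression sum for known_total, and sum(counts.values()) for total.
import Mathlib
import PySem

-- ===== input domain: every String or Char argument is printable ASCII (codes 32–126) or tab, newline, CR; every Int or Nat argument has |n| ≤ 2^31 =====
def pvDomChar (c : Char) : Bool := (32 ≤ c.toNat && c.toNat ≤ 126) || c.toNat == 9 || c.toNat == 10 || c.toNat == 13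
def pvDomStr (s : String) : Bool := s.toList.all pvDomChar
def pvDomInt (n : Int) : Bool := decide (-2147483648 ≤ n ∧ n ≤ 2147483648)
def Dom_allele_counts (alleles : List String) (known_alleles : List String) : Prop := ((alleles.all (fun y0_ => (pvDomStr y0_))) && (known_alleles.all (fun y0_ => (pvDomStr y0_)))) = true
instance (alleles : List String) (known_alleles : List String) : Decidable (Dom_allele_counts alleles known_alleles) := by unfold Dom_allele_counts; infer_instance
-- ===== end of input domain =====

-- B replaces A's single loop that mutates a dict and two running totals by declarative
-- passes: a per-base count comprehension, a generator-sum for known_total and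
-- sum(counts.values()) for total (objective: idiomatic; same return value).

-- ===== PORT A =====
def pyBases : List String := ["A", "C", "G", "T"]

def allele_counts (alleles : List String) (known_alleles : List String) : (List (String × Int)) × Int × Int :=
  -- counts = {x:0 for x in bases}
  let counts : PySem.Dict String Int := pyBases.foldl (fun d x => d.insert x 0) PySem.Dict.empty
  -- known_total = total = 0; for allele in alleles: ...
  let st :=
    alleles.foldl (fun (st : PySem.Dict String Int × Int × Int) allele =>
      let counts := st.1
      let known_total := st.2.1
      let total := st.2.2
      let (counts, total) :=
        if counts.contains allele then
          (counts.insert allele (counts.getD allele 0 + 1), total + 1)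
        else (counts, total)
      let known_total :=
        if known_alleles.contains allele then known_total + 1 else known_total
      (counts, known_total, total)) (counts, 0, 0)
  (st.1.items, st.2.1, st.2.2)

-- ===== PORT B =====
def allele_counts_alt (alleles : List String) (known_alleles : List String) : (List (String × Int)) × Int × Int :=
  -- counts = {x: alleles.count(x) for x in bases}
  let counts : PySem.Dict String Int :=
    pyBases.foldl (fun d x => d.insert x (PySem.List.count alleles x : Int)) PySem.Dict.empty
  -- known_total = sum(1 for a in alleles if a in known_alleles)
  let known_total : Int :=
    ((alleles.filter (fun a => known_alleles.contains a)).map (fun _ => (1 : Int))).sum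
  (counts.items, known_total, counts.values.sum)

-- ===== PRECONDITION & SPEC =====
def Spec_allele_counts (alleles : List String) (known_alleles : List String) (out : (List (String × Int)) × Int × Int) : Prop := out = allele_counts_alt alleles known_alleles
instance (alleles : List String) (known_alleles : List String) (out : (List (String × Int)) × Int × Int) : Decidable (Spec_allele_counts alleles known_alleles out) := by unfold Spec_allele_counts; infer_instance

-- ===== CLAIM (what is proved, stated in full; the proofs are below) =====
def Claim_equal_allele_counts : Prop := ∀ (alleles : List String) (known_alleles : List String), Dom_allele_counts alleles known_alleles → Spec_allele_counts alleles known_alleles (allele_counts alleles known_alleles)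

-- ===== LEMMAS AND PROOFS =====

-- the {A,C,G,T}-keyed dict with values a, c, g, t, shared shape of both ports' dicts
def baseDict (a c g t : Int) : PySem.Dict String Int :=
  PySem.Dict.ofList [("A", a), ("C", c), ("G", g), ("T", t)]

theorem baseDict_items (a c g t : Int) :
    (baseDict a c g t).items = [("A", a), ("C", c), ("G", g), ("T", t)] := by
  simp [baseDict, PySem.Dict.ofList, PySem.Dict.update, PySem.Dict.insert,
        PySem.Dict.empty, PySem.Dict.contains, PySem.Dict.items]

theorem baseDict_values (a c g t : Int) :
    (baseDict a c g t).values = [a, c, g, t] := by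
  simp [baseDict, PySem.Dict.ofList, PySem.Dict.update, PySem.Dict.insert,
        PySem.Dict.empty, PySem.Dict.contains, PySem.Dict.values]

-- A's initial dict {x:0 for x in bases}
theorem initDict_eq :
    pyBases.foldl (fun (d : PySem.Dict String Int) x => d.insert x 0) PySem.Dict.empty
      = baseDict 0 0 0 0 := by
  simp [pyBases, baseDict, PySem.Dict.ofList, PySem.Dict.update, PySem.Dict.insert,
        PySem.Dict.empty, PySem.Dict.contains]

-- B's dict {x: alleles.count(x) for x in bases}
theorem altDict_eq (alleles : List String) :
    pyBases.foldl (fun (d : PySem.Dict String Int) x => d.insert x (PySem.List.count alleles x : Int)) PySem.Dict.empty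
      = baseDict (PySem.List.count alleles "A") (PySem.List.count alleles "C")
                 (PySem.List.count alleles "G") (PySem.List.count alleles "T") := by
  simp [pyBases, baseDict, PySem.Dict.ofList, PySem.Dict.update, PySem.Dict.insert,
        PySem.Dict.empty, PySem.Dict.contains]

-- A's loop, characterised over an arbitrary accumulator
theorem loop_eval (ka : List String) (alleles : List String) :
    ∀ (a c g t kt tot : Int),
      alleles.foldl (fun (st : PySem.Dict String Int × Int × Int) allele =>
        let counts := st.1
        let known_total := st.2.1
        let total := st.2.2
        let (counts, total) :=
          if counts.contains allele then
            (counts.insert allele (counts.getD allele 0 + 1), total + 1)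
          else (counts, total)
        let known_total :=
          if ka.contains allele then known_total + 1 else known_total
        (counts, known_total, total)) (baseDict a c g t, kt, tot)
      = (baseDict (a + alleles.count "A") (c + alleles.count "C")
                  (g + alleles.count "G") (t + alleles.count "T"),
         kt + alleles.countP (fun x => ka.contains x),
         tot + alleles.countP (fun x => pyBases.contains x)) := by
  induction alleles with
  | nil => simp
  | cons x rest ih =>
    intro a c g t kt tot
    rw [List.foldl_cons]
    by_cases hA : x = "A"
    · subst hA
      have h1 : (baseDict a c g t).contains "A" = true := by
        simp [baseDict, PySem.Dict.ofList, PySem.Dict.update, PySem.Dict.insert, PySem.Dict.empty, PySem.Dict.contains]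
      have h2 : (baseDict a c g t).insert "A" ((baseDict a c g t).getD "A" 0 + 1) = baseDict (a + 1) c g t := by
        simp [baseDict, PySem.Dict.ofList, PySem.Dict.update, PySem.Dict.insert, PySem.Dict.empty, PySem.Dict.getD, PySem.Dict.get?]
      simp only [h1, if_true, h2]
      rw [ih]
      simp only [Prod.mk.injEq]
      refine ⟨?_, ?_, ?_⟩
      · congr 1 <;> simp [List.count_cons] <;> push_cast <;> ring
      · simp only [List.countP_cons]
        split_ifs <;> push_cast <;> omega
      · simp [List.countP_cons, pyBases]
        push_cast; ring
    · by_cases hC : x = "C"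
      · subst hC
        have h1 : (baseDict a c g t).contains "C" = true := by
          simp [baseDict, PySem.Dict.ofList, PySem.Dict.update, PySem.Dict.insert, PySem.Dict.empty, PySem.Dict.contains]
        have h2 : (baseDict a c g t).insert "C" ((baseDict a c g t).getD "C" 0 + 1) = baseDict a (c + 1) g t := by
          simp [baseDict, PySem.Dict.ofList, PySem.Dict.update, PySem.Dict.insert, PySem.Dict.empty, PySem.Dict.getD, PySem.Dict.get?]
        simp only [h1, if_true, h2]
        rw [ih]
        simp only [Prod.mk.injEq]
        refine ⟨?_, ?_, ?_⟩
        · congr 1 <;> simp [List.count_cons, hA] <;> push_cast <;> ring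
        · simp only [List.countP_cons]
          split_ifs <;> push_cast <;> omega
        · simp [List.countP_cons, pyBases]
          push_cast; ring
      · by_cases hG : x = "G"
        · subst hG
          have h1 : (baseDict a c g t).contains "G" = true := by
            simp [baseDict, PySem.Dict.ofList, PySem.Dict.update, PySem.Dict.insert, PySem.Dict.empty, PySem.Dict.contains]
          have h2 : (baseDict a c g t).insert "G" ((baseDict a c g t).getD "G" 0 + 1) = baseDict a c (g + 1) t := by
            simp [baseDict, PySem.Dict.ofList, PySem.Dict.update, PySem.Dict.insert, PySem.Dict.empty, PySem.Dict.getD, PySem.Dict.get?]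
          simp only [h1, if_true, h2]
          rw [ih]
          simp only [Prod.mk.injEq]
          refine ⟨?_, ?_, ?_⟩
          · congr 1 <;> simp [List.count_cons, hA, hC] <;> push_cast <;> ring
          · simp only [List.countP_cons]
            split_ifs <;> push_cast <;> omega
          · simp [List.countP_cons, pyBases]
            push_cast; ring
        · by_cases hT : x = "T"
          · subst hT
            have h1 : (baseDict a c g t).contains "T" = true := by
              simp [baseDict, PySem.Dict.ofList, PySem.Dict.update, PySem.Dict.insert, PySem.Dict.empty, PySem.Dict.contains]
            have h2 : (baseDict a c g t).insert "T" ((baseDict a c g t).getD "T" 0 + 1) = baseDict a c g (t + 1) := by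
              simp [baseDict, PySem.Dict.ofList, PySem.Dict.update, PySem.Dict.insert, PySem.Dict.empty, PySem.Dict.getD, PySem.Dict.get?]
            simp only [h1, if_true, h2]
            rw [ih]
            simp only [Prod.mk.injEq]
            refine ⟨?_, ?_, ?_⟩
            · congr 1 <;> simp [List.count_cons, hA, hC, hG] <;> push_cast <;> ring
            · simp only [List.countP_cons]
              split_ifs <;> push_cast <;> omega
            · simp [List.countP_cons, pyBases]
              push_cast; ring
          · have h1 : (baseDict a c g t).contains x = false := by
              simp [baseDict, PySem.Dict.ofList, PySem.Dict.update, PySem.Dict.insert, PySem.Dict.empty, PySem.Dict.contains]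
              exact ⟨Ne.symm hA, Ne.symm hC, Ne.symm hG, Ne.symm hT⟩
            simp only [h1, Bool.false_eq_true, if_false]
            rw [ih]
            simp only [Prod.mk.injEq]
            refine ⟨?_, ?_, ?_⟩
            · congr 1 <;> simp [List.count_cons, hA, hC, hG, hT]
            · simp only [List.countP_cons]
              split_ifs <;> push_cast <;> omega
            · simp [List.countP_cons, pyBases, hA, hC, hG, hT]

-- the total over bases is the sum of the four per-base counts
theorem countP_bases (l : List String) :
    l.countP (fun x => pyBases.contains x)
      = l.count "A" + l.count "C" + l.count "G" + l.count "T" := by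
  induction l with
  | nil => simp
  | cons x r ih =>
    rw [List.countP_cons, ih]
    simp only [List.count_cons]
    by_cases hA : x = "A"
    · subst hA; simp [pyBases]; omega
    · by_cases hC : x = "C"
      · subst hC; simp [pyBases, Ne.symm hA]; omega
      · by_cases hG : x = "G"
        · subst hG; simp [pyBases, Ne.symm hA, Ne.symm hC]; omega
        · by_cases hT : x = "T"
          · subst hT; simp [pyBases, Ne.symm hA, Ne.symm hC, Ne.symm hG]; omega
          · simp [pyBases, hA, hC, hG, hT, Ne.symm hA, Ne.symm hC, Ne.symm hG, Ne.symm hT]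

-- B's generator sum is a countP
theorem sum_ones_filter (l : List String) (ka : List String) :
    ((l.filter (fun a => ka.contains a)).map (fun _ => (1 : Int))).sum
      = (l.countP (fun x => ka.contains x) : Int) := by
  rw [List.map_const']
  simp [List.sum_replicate, List.countP_eq_length_filter]

-- ===== VERDICT (by name: the statement is the Claim_ definition above) =====
theorem allele_counts_spec : Claim_equal_allele_counts := by
  intro alleles known_alleles _
  unfold Spec_allele_counts
  simp only [allele_counts, allele_counts_alt]
  rw [initDict_eq, altDict_eq, loop_eval, baseDict_values]
  simp only [baseDict_items, PySem.List.count_eq, sum_ones_filter, countP_bases]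
  simp only [Prod.mk.injEq]
  refine ⟨by norm_num, ?_, ?_⟩ <;> simp [List.sum_cons] <;> push_cast <;> ring
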